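-- pv_equiv track=rewrite | github.com/Joussflls10/cyberlab | backend/services/grinder.py | _validate_git_challenge_mix
-- ===== SOURCE A (Python) =====
-- from typing import List, Dict, Any, Optional
--
-- def _validate_git_challenge_mix(challenges: List[Dict[str, Any]]) -> Optional[str]:
--     has_repo_state = False
--     has_config_or_commit = False
--     has_branch_or_history = False
--
--     for challenge in challenges:
--         q = str(challenge.get("question") or "").lower()
--         s = str(challenge.get("validation_script") or "").lower()
--
--         if any(token in q for token in ["git init", "initialize a git repository", ".git"]) or ".git" in s:
--             has_repo_state = True
--
--         if any(token in q for token in ["git config", "commit", "user.email", "user.name"]):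
--             has_config_or_commit = True
--         if any(token in s for token in ["git config", "git log", "git commit"]):
--             has_config_or_commit = True
--
--         if any(token in q for token in ["branch", "checkout", "switch", "log", "history"]):
--             has_branch_or_history = True
--         if any(token in s for token in ["git branch", "--show-current", "git log"]):
--             has_branch_or_history = True
--
--     missing = []
--     if not has_repo_state:
--         missing.append("repository state/init")
--     if not has_config_or_commit:
--         missing.append("config/commit")
--     if not has_branch_or_history:
--         missing.append("branch/history")
--
--     if missing:
--         return f"git challenge mix missing required types: {', '.join(missing)}"
--     return None
-- ===== SOURCE B (Python) =====
-- from typing import List, Dict, Any, Optional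
--
-- def _texts(challenge):
--     q = str(challenge.get("question") or "").lower()
--     s = str(challenge.get("validation_script") or "").lower()
--     return q, s
--
-- def _repo_state(challenge):
--     q, s = _texts(challenge)
--     return any(t in q for t in ["git init", "initialize a git repository", ".git"]) or ".git" in s
--
-- def _config_or_commit(challenge):
--     q, s = _texts(challenge)
--     return (any(t in q for t in ["git config", "commit", "user.email", "user.name"])
--             or any(t in s for t in ["git config", "git log", "git commit"]))
--
-- def _branch_or_history(challenge):
--     q, s = _texts(challenge)
--     return (any(t in q for t in ["branch", "checkout", "switch", "log", "history"])
--             or any(t in s for t in ["git branch", "--show-current", "git log"]))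
--
-- def _validate_git_challenge_mix(challenges: List[Dict[str, Any]]) -> Optional[str]:
--     requirements = [
--         ("repository state/init", _repo_state),
--         ("config/commit", _config_or_commit),
--         ("branch/history", _branch_or_history),
--     ]
--     missing = [name for name, pred in requirements
--                if not any(pred(c) for c in challenges)]
--     if missing:
--         return "git challenge mix missing required types: " + ", ".join(missing)
--     return None
-- ===== Notes on version B (the rewrite author's own statement) =====
-- stated objective: simpler
-- what changed: Replaced the single loop that threads three mutable flags with three independent any() scans (one predicate per required category) and a declarative table filter building the missing list.
import Mathlib
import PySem

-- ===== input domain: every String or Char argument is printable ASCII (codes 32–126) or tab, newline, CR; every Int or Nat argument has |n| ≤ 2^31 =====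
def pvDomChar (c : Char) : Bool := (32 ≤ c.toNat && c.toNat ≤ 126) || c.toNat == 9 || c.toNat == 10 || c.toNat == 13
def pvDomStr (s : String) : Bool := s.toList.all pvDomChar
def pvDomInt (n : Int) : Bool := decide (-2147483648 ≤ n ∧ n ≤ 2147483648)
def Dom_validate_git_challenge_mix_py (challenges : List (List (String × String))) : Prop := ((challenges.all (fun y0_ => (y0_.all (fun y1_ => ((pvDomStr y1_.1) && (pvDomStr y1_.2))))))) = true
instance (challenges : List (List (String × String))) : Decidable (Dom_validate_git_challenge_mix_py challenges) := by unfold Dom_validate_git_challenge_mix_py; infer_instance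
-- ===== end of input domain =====

-- B replaces A's single flag-maintaining loop by three independent any-scans, one per
-- required category, and builds `missing` by filtering a table (objective: simpler).

-- ===== PORT A =====
-- literal transliteration of A's loop: three flags threaded through one pass;
-- pvStepA is the loop body
def pvStepA (st : Bool × Bool × Bool) (challenge : List (String × String)) : Bool × Bool × Bool :=
    let q := PySem.Str.lower (PySem.Dict.getD (PySem.Dict.mk challenge) "question" "")
    let s := PySem.Str.lower (PySem.Dict.getD (PySem.Dict.mk challenge) "validation_script" "")
    let hasRepo :=
      if (["git init", "initialize a git repository", ".git"].any (fun t => PySem.Str.isIn t q)) || PySem.Str.isIn ".git" s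
      then true else st.1
    let hasCfg :=
      if ["git config", "commit", "user.email", "user.name"].any (fun t => PySem.Str.isIn t q)
      then true else st.2.1
    let hasCfg :=
      if ["git config", "git log", "git commit"].any (fun t => PySem.Str.isIn t s)
      then true else hasCfg
    let hasBr :=
      if ["branch", "checkout", "switch", "log", "history"].any (fun t => PySem.Str.isIn t q)
      then true else st.2.2
    let hasBr :=
      if ["git branch", "--show-current", "git log"].any (fun t => PySem.Str.isIn t s)
      then true else hasBr
    (hasRepo, hasCfg, hasBr)

def validate_git_challenge_mix_py (challenges : List (List (String × String))) : Option String :=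
  let st := challenges.foldl pvStepA (false, false, false)
  let missing : List String :=
    (if !st.1 then ["repository state/init"] else []) ++
    (if !st.2.1 then ["config/commit"] else []) ++
    (if !st.2.2 then ["branch/history"] else [])
  if missing ≠ [] then
    some ("git challenge mix missing required types: " ++ PySem.Str.join ", " missing)
  else none

-- ===== PORT B =====
def pvTexts (challenge : List (String × String)) : String × String :=
  (PySem.Str.lower (PySem.Dict.getD (PySem.Dict.mk challenge) "question" ""),
   PySem.Str.lower (PySem.Dict.getD (PySem.Dict.mk challenge) "validation_script" ""))

def pvRepoState (challenge : List (String × String)) : Bool :=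
  let qs := pvTexts challenge
  (["git init", "initialize a git repository", ".git"].any (fun t => PySem.Str.isIn t qs.1))
    || PySem.Str.isIn ".git" qs.2

def pvConfigOrCommit (challenge : List (String × String)) : Bool :=
  let qs := pvTexts challenge
  (["git config", "commit", "user.email", "user.name"].any (fun t => PySem.Str.isIn t qs.1))
    || (["git config", "git log", "git commit"].any (fun t => PySem.Str.isIn t qs.2))

def pvBranchOrHistory (challenge : List (String × String)) : Bool :=
  let qs := pvTexts challenge
  (["branch", "checkout", "switch", "log", "history"].any (fun t => PySem.Str.isIn t qs.1))
    || (["git branch", "--show-current", "git log"].any (fun t => PySem.Str.isIn t qs.2))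

def validate_git_challenge_mix_py_alt (challenges : List (List (String × String))) : Option String :=
  let requirements : List (String × (List (String × String) → Bool)) :=
    [("repository state/init", pvRepoState),
     ("config/commit", pvConfigOrCommit),
     ("branch/history", pvBranchOrHistory)]
  let missing := requirements.filterMap (fun p =>
    if ! challenges.any p.2 then some p.1 else none)
  if missing ≠ [] then
    some ("git challenge mix missing required types: " ++ PySem.Str.join ", " missing)
  else none

-- ===== PRECONDITION & SPEC =====
def Spec_validate_git_challenge_mix_py (challenges : List (List (String × String))) (out : Option String) : Prop := out = validate_git_challenge_mix_py_alt challenges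
instance (challenges : List (List (String × String))) (out : Option String) : Decidable (Spec_validate_git_challenge_mix_py challenges out) := by unfold Spec_validate_git_challenge_mix_py; infer_instance

-- ===== CLAIM (what is proved, stated in full; the proofs are below) =====
def Claim_equal_validate_git_challenge_mix_py : Prop := ∀ (challenges : List (List (String × String))), Dom_validate_git_challenge_mix_py challenges → Spec_validate_git_challenge_mix_py challenges (validate_git_challenge_mix_py challenges)

-- ===== LEMMAS AND PROOFS =====

theorem pv_step_eq (st : Bool × Bool × Bool) (x : List (String × String)) :
    pvStepA st x = (st.1 || pvRepoState x, st.2.1 || pvConfigOrCommit x, st.2.2 || pvBranchOrHistory x) := by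
  simp only [pvStepA, pvRepoState, pvConfigOrCommit, pvBranchOrHistory, pvTexts]
  refine Prod.ext ?_ (Prod.ext ?_ ?_) <;> dsimp only [] <;> split_ifs <;> simp_all

-- A's one-pass fold of the three flags equals the three independent any-scans (with the
-- initial flags or-ed in).
theorem pv_foldl_flags (l : List (List (String × String))) (a b c : Bool) :
    l.foldl pvStepA (a, b, c)
    = (a || l.any pvRepoState, b || l.any pvConfigOrCommit, c || l.any pvBranchOrHistory) := by
  induction l generalizing a b c with
  | nil => simp
  | cons x xs ih =>
    rw [List.foldl_cons, pv_step_eq, ih]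
    simp [Bool.or_assoc]

-- ===== VERDICT (by name: the statement is the Claim_ definition above) =====
theorem validate_git_challenge_mix_py_spec : Claim_equal_validate_git_challenge_mix_py := by
  intro challenges _
  unfold Spec_validate_git_challenge_mix_py validate_git_challenge_mix_py validate_git_challenge_mix_py_alt
  rw [pv_foldl_flags]
  simp only [Bool.false_or, List.filterMap]
  cases challenges.any pvRepoState <;> cases challenges.any pvConfigOrCommit <;>
    cases challenges.any pvBranchOrHistory <;> rfl
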